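-- pv_equiv track=rewrite | github.com/StivenPabloJimenezCastillo/Ape_3_automatas | nodeterministas/problema_7.py | telemetria
-- ===== SOURCE A (Python) =====
-- def telemetria(dispositivo):
--     estados = {"q0"}
--
--     for simbolo in dispositivo:
--         nuevos_estados = set()
--
--         for estado in estados:
--             if estado == "q0":
--                 if simbolo == "HDR":
--                     nuevos_estados.add("q1")
--
--             elif estado == "q1":
--                 if simbolo == "TEMP" or simbolo == "HUM":
--                     nuevos_estados.update(["q1", "q2"])
--                 elif simbolo == "CRC":
--                     nuevos_estados.add("q3")
--
--             elif estado == "q2":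
--                 if simbolo == "TEMP" or simbolo == "HUM":
--                     nuevos_estados.add("q2")
--                 elif simbolo == "CRC":
--                     nuevos_estados.add("q3")
--
--         estados = nuevos_estados
--
--     return "q3" in estados
-- ===== SOURCE B (Python) =====
-- def telemetria(dispositivo):
--     # The NFA accepts exactly: HDR, then zero or more TEMP/HUM, then CRC.
--     seq = list(dispositivo)
--     return (len(seq) >= 2
--             and seq[0] == "HDR"
--             and seq[-1] == "CRC"
--             and all(s in ("TEMP", "HUM") for s in seq[1:-1]))
-- ===== Notes on version B (the rewrite author's own statement) =====
-- stated objective: simpler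
-- what changed: Replaces the per-symbol set-of-states NFA fixpoint with a direct positional predicate: first symbol HDR, last symbol CRC, all middle symbols TEMP/HUM.
import Mathlib
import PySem

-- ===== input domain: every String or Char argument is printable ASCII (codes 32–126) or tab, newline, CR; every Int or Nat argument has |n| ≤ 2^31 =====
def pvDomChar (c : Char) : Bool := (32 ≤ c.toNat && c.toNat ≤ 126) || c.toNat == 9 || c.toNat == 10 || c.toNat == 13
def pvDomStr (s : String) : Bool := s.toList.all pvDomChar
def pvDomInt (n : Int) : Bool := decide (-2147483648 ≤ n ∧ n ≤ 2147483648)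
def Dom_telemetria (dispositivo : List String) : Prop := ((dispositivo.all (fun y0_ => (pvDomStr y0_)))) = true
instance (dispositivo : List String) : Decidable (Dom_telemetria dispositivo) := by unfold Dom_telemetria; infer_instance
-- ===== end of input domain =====

-- B replaces A's per-symbol set-of-states NFA simulation by a direct positional
-- predicate (first = HDR, last = CRC, middle all TEMP/HUM); objective: simpler.

-- ===== PORT A =====
-- Inner loop over 'estados' building 'nuevos_estados'. The result is only
-- inspected through membership ("q3" in estados), which is independent of the
-- (unmodelled) Python set iteration order.
def stepA (estados : PySem.Set String) (simbolo : String) : PySem.Set String :=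
  estados.foldl (fun nuevos estado =>
    if estado == "q0" then
      if simbolo == "HDR" then PySem.Set.add nuevos "q1" else nuevos
    else if estado == "q1" then
      if simbolo == "TEMP" || simbolo == "HUM" then PySem.Set.update nuevos ["q1", "q2"]
      else if simbolo == "CRC" then PySem.Set.add nuevos "q3" else nuevos
    else if estado == "q2" then
      if simbolo == "TEMP" || simbolo == "HUM" then PySem.Set.add nuevos "q2"
      else if simbolo == "CRC" then PySem.Set.add nuevos "q3" else nuevos
    else nuevos) PySem.Set.empty

def telemetria (dispositivo : List String) : Bool :=
  (dispositivo.foldl stepA (PySem.Set.ofList ["q0"])).contains "q3"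

-- ===== PORT B =====
def telemetria_alt (dispositivo : List String) : Bool :=
  decide (2 ≤ dispositivo.length)
    && (PySem.List.pyGetD dispositivo 0 "" == "HDR")
    && (PySem.List.pyGetD dispositivo (-1) "" == "CRC")
    && (PySem.List.slice dispositivo (some 1) (some (-1))).all
         (fun s => s == "TEMP" || s == "HUM")

-- ===== PRECONDITION & SPEC =====
def Spec_telemetria (dispositivo : List String) (out : Bool) : Prop := out = telemetria_alt dispositivo
instance (dispositivo : List String) (out : Bool) : Decidable (Spec_telemetria dispositivo out) := by unfold Spec_telemetria; infer_instance

-- ===== CLAIM (what is proved, stated in full; the proofs are below) =====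
def Claim_equal_telemetria : Prop := ∀ (dispositivo : List String), Dom_telemetria dispositivo → Spec_telemetria dispositivo (telemetria dispositivo)

-- ===== LEMMAS AND PROOFS =====

-- recursive characterisation of "TEMP/HUM* CRC"
def checkB : List String → Bool
  | [] => false
  | [x] => x == "CRC"
  | x :: y :: r => (x == "TEMP" || x == "HUM") && checkB (y :: r)

lemma stepA_q0 (s : String) :
    stepA ["q0"] s = if s == "HDR" then ["q1"] else [] := by
  by_cases h : s = "HDR" <;>
    simp [stepA, PySem.Set.add, PySem.Set.empty, PySem.Set.contains, h]

lemma stepA_nil (s : String) : stepA [] s = [] := rfl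

lemma stepA_q3 (s : String) : stepA ["q3"] s = [] := by
  simp [stepA, PySem.Set.empty]

lemma stepA_q1 (s : String) :
    stepA ["q1"] s =
      if s == "TEMP" || s == "HUM" then ["q1", "q2"]
      else if s == "CRC" then ["q3"] else [] := by
  by_cases h1 : s = "TEMP" <;> by_cases h2 : s = "HUM" <;> by_cases h3 : s = "CRC" <;>
    simp [stepA, PySem.Set.add, PySem.Set.update, PySem.Set.empty, PySem.Set.contains,
      h1, h2, h3]

lemma stepA_q12 (s : String) : stepA ["q1", "q2"] s = stepA ["q1"] s := by
  by_cases h1 : s = "TEMP" <;> by_cases h2 : s = "HUM" <;> by_cases h3 : s = "CRC" <;>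
    simp [stepA, PySem.Set.add, PySem.Set.update, PySem.Set.empty, PySem.Set.contains,
      h1, h2, h3]

lemma foldl_nil_dead (rest : List String) :
    rest.foldl stepA [] = [] := by
  induction rest with
  | nil => rfl
  | cons s r ih => simpa [stepA_nil] using ih

lemma go_q12 (rest : List String) :
    (rest.foldl stepA ["q1", "q2"]).contains "q3"
      = (rest.foldl stepA ["q1"]).contains "q3" := by
  cases rest with
  | nil => decide
  | cons s r => simp [List.foldl_cons, stepA_q12]

lemma go_q1 (rest : List String) :
    (rest.foldl stepA ["q1"]).contains "q3" = checkB rest := by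
  induction rest with
  | nil => decide
  | cons s r ih =>
    rw [List.foldl_cons, stepA_q1]
    by_cases hm : s == "TEMP" || s == "HUM"
    · rw [if_pos hm, go_q12, ih]
      cases r with
      | nil =>
        have : ¬ (s == "CRC") = true := by
          rcases Bool.or_eq_true_iff.mp hm with h | h <;>
            simp_all [beq_iff_eq]
        simp [checkB, this]
      | cons y r' => simp [checkB, hm]
    · rw [if_neg hm]
      by_cases hc : s == "CRC"
      · rw [if_pos hc]
        cases r with
        | nil => simp [checkB, hc]
        | cons y r' =>
          rw [List.foldl_cons, stepA_q3, foldl_nil_dead]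
          simp [checkB, hm]
      · rw [if_neg hc, foldl_nil_dead]
        cases r with
        | nil => simp [checkB, hc]
        | cons y r' => simp [checkB, hm]

lemma checkB_eq_last_mid (l : List String) (h : l ≠ []) :
    checkB l = ((l.getLast h == "CRC")
      && l.dropLast.all (fun s => s == "TEMP" || s == "HUM")) := by
  induction l with
  | nil => exact absurd rfl h
  | cons x t ih =>
    cases t with
    | nil => simp [checkB]
    | cons y r =>
      rw [checkB, ih (by simp)]
      simp [List.getLast_cons, Bool.and_assoc, Bool.and_comm]

lemma alt_cons (s : String) (rest : List String) :
    telemetria_alt (s :: rest) = ((s == "HDR") && checkB rest) := by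
  induction rest with
  | nil =>
    simp [telemetria_alt, checkB]
  | cons y r ih =>
    -- both sides in terms of getLast/dropLast of y :: r
    have hne : (y :: r) ≠ ([] : List String) := by simp
    have hlast : PySem.List.pyGetD (s :: y :: r) (-1) "" = (y :: r).getLast hne := by
      rw [PySem.List.pyGetD_neg_one (xs := s :: y :: r) (h := by simp)]
      simp [List.getLast_cons]
    have hslice : PySem.List.slice (s :: y :: r) (some 1) (some (-1))
        = (y :: r).dropLast := by
      simp [PySem.List.slice, PySem.List.clampIdx]
      have h : ¬ ((r.length : Int) + 1 < 0) := by omega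
      rw [if_neg h, List.dropLast_eq_take]
      simp
    rw [telemetria_alt, hlast, hslice]
    -- rhs: checkB via getLast/dropLast, by a small induction packaged in aux below
    rw [checkB_eq_last_mid (y :: r) hne]
    cases hh : (s == "HDR") <;> cases hcrc : ((y :: r).getLast hne == "CRC") <;>
      simp [hh, Bool.and_comm]

theorem telemetria_spec : Claim_equal_telemetria := by
  intro d _
  unfold Spec_telemetria
  cases d with
  | nil => decide
  | cons s rest =>
    rw [alt_cons]
    show (List.foldl stepA (PySem.Set.ofList ["q0"]) (s :: rest)).contains "q3" = _
    have h0 : PySem.Set.ofList ["q0"] = ["q0"] := rfl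
    rw [h0, List.foldl_cons, stepA_q0]
    by_cases hh : s == "HDR"
    · rw [if_pos hh, go_q1, hh, Bool.true_and]
    · rw [if_neg hh, foldl_nil_dead]
      simp [PySem.Set.contains, hh]
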